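-- pv_equiv track=rewrite | github.com/VenkatVinesh46/DSA_Daily | Day_02/logic_building.py | ransom_note_check
-- ===== SOURCE A (Python) =====
-- def ransom_note_check(magazine, note):
--     if len(note)>len(magazine):
--         return False
--     freq={}
--     for ch in magazine:
--         freq[ch]=freq.get(ch, 0) + 1
--     for ch in note:
--         if ch not in freq:
--             return False
--         if freq[ch]>0:
--             freq[ch]-=1
--         else:
--             return False
--     return True
-- ===== SOURCE B (Python) =====
-- def ransom_note_check(magazine, note):
--     need = {}
--     for ch in note:
--         need[ch] = need.get(ch, 0) + 1
--     have = {}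
--     for ch in magazine:
--         have[ch] = have.get(ch, 0) + 1
--     return all(have.get(ch, 0) >= cnt for ch, cnt in need.items())
-- ===== Notes on version B (the rewrite author's own statement) =====
-- stated objective: simpler
-- what changed: Replaces A's length guard plus build-one-table-then-decrement-with-early-exit loop by two independent frequency tallies (note and magazine) compared with a single all(...) subset test; the explicit length guard is subsumed by the count comparison.
import Mathlib
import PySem

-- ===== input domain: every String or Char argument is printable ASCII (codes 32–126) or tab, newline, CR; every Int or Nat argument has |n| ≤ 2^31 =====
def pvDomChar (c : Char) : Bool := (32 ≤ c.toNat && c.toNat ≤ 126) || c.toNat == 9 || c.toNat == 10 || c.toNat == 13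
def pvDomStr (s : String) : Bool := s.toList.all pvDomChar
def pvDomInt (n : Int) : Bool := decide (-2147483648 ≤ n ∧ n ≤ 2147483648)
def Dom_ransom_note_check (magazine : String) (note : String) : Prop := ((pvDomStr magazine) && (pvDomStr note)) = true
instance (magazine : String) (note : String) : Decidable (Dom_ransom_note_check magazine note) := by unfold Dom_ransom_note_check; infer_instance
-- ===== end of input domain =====

-- B replaces A's build-then-decrement-with-early-exit loop by two independent
-- frequency tallies compared with one all(...) test (simpler decomposition; same cost).

-- ===== PORT A =====
-- the second loop of A: 'for ch in note: …' with early returns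
def ransomLoop (freq : PySem.Dict Char Int) : List Char → Bool
  | [] => true
  | ch :: rest =>
    if freq.contains ch = false then false
    else if freq.getD ch 0 > 0 then ransomLoop (freq.modify ch 0 (· - 1)) rest
    else false

-- freq (A's first loop) is inlined into its one use site
def ransom_note_check (magazine : String) (note : String) : Bool :=
  if PySem.Str.len note > PySem.Str.len magazine then false
  else
    ransomLoop
      (magazine.toList.foldl (fun d ch => d.insert ch (d.getD ch 0 + 1))
        (PySem.Dict.empty : PySem.Dict Char Int))
      note.toList

-- ===== PORT B =====
-- Source B's two tallies 'need' and 'have' are inlined into the final all(...)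
def ransom_note_check_alt (magazine : String) (note : String) : Bool :=
  (note.toList.foldl (fun d ch => d.insert ch (d.getD ch 0 + 1))
      (PySem.Dict.empty : PySem.Dict Char Int)).items.all
    (fun p =>
      (magazine.toList.foldl (fun d ch => d.insert ch (d.getD ch 0 + 1))
          (PySem.Dict.empty : PySem.Dict Char Int)).getD p.1 0 ≥ p.2)

-- ===== PRECONDITION & SPEC =====
def Spec_ransom_note_check (magazine : String) (note : String) (out : Bool) : Prop := out = ransom_note_check_alt magazine note
instance (magazine : String) (note : String) (out : Bool) : Decidable (Spec_ransom_note_check magazine note out) := by unfold Spec_ransom_note_check; infer_instance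

-- ===== CLAIM (what is proved, stated in full; the proofs are below) =====
def Claim_equal_ransom_note_check : Prop := ∀ (magazine : String) (note : String), Dom_ransom_note_check magazine note → Spec_ransom_note_check magazine note (ransom_note_check magazine note)


-- ===== LEMMAS AND PROOFS =====

-- A's decrement loop succeeds iff the remaining note's counts fit in the table
theorem ransomLoop_eq_true_iff (rest : List Char) (d : PySem.Dict Char Int) :
    ransomLoop d rest = true ↔ ∀ c ∈ rest, (rest.count c : Int) ≤ d.getD c 0 := by
  induction rest generalizing d with
  | nil => simp [ransomLoop]
  | cons ch rest ih =>
    have hcc1 : List.count ch (ch :: rest) = List.count ch rest + 1 := by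
      simp
    have hcc2 : ∀ c, c ≠ ch → List.count c (ch :: rest) = List.count c rest := by
      intro c hne
      simp [(Ne.symm hne : ch ≠ c)]
    cases hc : d.contains ch with
    | false =>
      have h0 : d.getD ch 0 = 0 := PySem.Dict.getD_of_not_contains d 0 hc
      simp only [ransomLoop, hc]
      rw [if_pos trivial]
      simp only [Bool.false_eq_true, false_iff]
      intro h
      have := h ch (by simp)
      omega
    | true =>
      simp only [ransomLoop, hc]
      rw [if_neg (show ¬(true = false) by decide)]
      by_cases hpos : d.getD ch 0 > 0
      · rw [if_pos hpos, ih]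
        have hmod : ∀ c, (d.modify ch 0 (· - 1)).getD c 0
            = if c = ch then d.getD ch 0 - 1 else d.getD c 0 := by
          intro c
          rw [PySem.Dict.getD_modify]
        constructor
        · intro h c hmem
          by_cases hceq : c = ch
          · subst hceq
            have hr : (List.count c rest : Int) ≤ d.getD c 0 - 1 := by
              by_cases hmm : c ∈ rest
              · have := h c hmm
                rw [hmod c, if_pos rfl] at this
                exact this
              · rw [List.count_eq_zero_of_not_mem hmm]
                omega
            omega
          · have hcm : c ∈ rest := by
              rcases List.mem_cons.mp hmem with h' | h'
              · exact absurd h' hceq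
              · exact h'
            have := h c hcm
            rw [hmod c, if_neg hceq] at this
            have := hcc2 c hceq
            omega
        · intro h c hcm
          rw [hmod c]
          by_cases hceq : c = ch
          · subst hceq
            rw [if_pos rfl]
            have := h c (by simp)
            omega
          · rw [if_neg hceq]
            have := h c (List.mem_cons_of_mem _ hcm)
            have := hcc2 c hceq
            omega
      · rw [if_neg hpos]
        simp only [Bool.false_eq_true, false_iff]
        intro h
        have := h ch (by simp)
        omega

-- B succeeds iff every note letter's count fits in the magazine
theorem alt_eq_true_iff (magazine note : String) :
    ransom_note_check_alt magazine note = true ↔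
      ∀ c ∈ note.toList, (note.toList.count c : Int) ≤ (magazine.toList.count c : Int) := by
  unfold ransom_note_check_alt
  rw [PySem.Dict.foldl_insert_getD_add_one_eq_counter,
      PySem.Dict.foldl_insert_getD_add_one_eq_counter]
  rw [List.all_eq_true]
  constructor
  · intro h c hc
    have := h (c, (note.toList.count c : Int))
      (by rw [PySem.Dict.items_counter]
          exact List.mem_map_of_mem (by rw [PySem.Set.mem_ofList]; exact hc))
    simpa [PySem.Dict.getD_counter] using this
  · intro h p hp
    rw [PySem.Dict.items_counter] at hp
    rcases List.mem_map.mp hp with ⟨k, hk, rfl⟩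
    rw [PySem.Set.mem_ofList] at hk
    simpa [PySem.Dict.getD_counter] using h k hk

-- the count condition forces the length condition
theorem length_le_of_counts (n m : List Char)
    (h : ∀ c ∈ n, (n.count c : Int) ≤ (m.count c : Int)) : n.length ≤ m.length := by
  have hsub : n.Subperm m := by
    rw [List.subperm_ext_iff]
    intro x hx
    exact_mod_cast h x hx
  exact hsub.length_le

-- ===== VERDICT (by name: the statement is the Claim_ definition above) =====
theorem ransom_note_check_spec : Claim_equal_ransom_note_check := by
  intro magazine note _
  unfold Spec_ransom_note_check
  rw [Bool.eq_iff_iff, alt_eq_true_iff]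
  unfold ransom_note_check
  by_cases hlen : PySem.Str.len note > PySem.Str.len magazine
  · rw [if_pos hlen]
    simp only [Bool.false_eq_true, false_iff]
    intro h
    have hle := length_le_of_counts note.toList magazine.toList h
    have h1 : note.toList.length = note.length := String.length_toList
    have h2 : magazine.toList.length = magazine.length := String.length_toList
    simp [PySem.Str.len_eq] at hlen
    omega
  · rw [if_neg hlen]
    rw [PySem.Dict.foldl_insert_getD_add_one_eq_counter, ransomLoop_eq_true_iff]
    constructor
    · intro h c hc
      simpa [PySem.Dict.getD_counter] using h c hc
    · intro h c hc
      simpa [PySem.Dict.getD_counter] using h c hc
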